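-- pv_equiv track=rewrite | github.com/nedbat/adventofcode2017 | day24.py | bridges
-- ===== SOURCE A (Python) =====
-- def bridges(components, sofar=()):
--     last_port = sofar[-1][1] if sofar else 0
--     for i, comp in enumerate(components):
--         use_comp = None
--         if comp[0] == last_port:
--             use_comp = comp
--         elif comp[1] == last_port:
--             use_comp = comp[::-1]
--         if use_comp:
--             bridge = sofar + (use_comp,)
--             yield bridge
--             yield from bridges(components[:i] + components[i+1:], bridge)
-- ===== SOURCE B (Python) =====
-- def bridges(components, sofar=()):
--     # Iterative pre-order DFS with an explicit stack instead of recursion.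
--     stack = [(tuple(components), tuple(sofar), False)]
--     while stack:
--         comps, bridge, emit = stack.pop()
--         if emit:
--             yield bridge
--         last = bridge[-1][1] if bridge else 0
--         children = []
--         for i, comp in enumerate(comps):
--             if comp[0] == last:
--                 use = comp
--             elif comp[1] == last:
--                 use = comp[::-1]
--             else:
--                 continue
--             children.append((comps[:i] + comps[i + 1:], bridge + (use,), True))
--         # push in reverse so the LIFO stack pops children in original order
--         stack.extend(reversed(children))
-- ===== Notes on version B (the rewrite author's own statement) =====
-- stated objective: alternative
-- what changed: The recursive generator is replaced by an iterative pre-order DFS that pops (remaining-components, bridge, emit) states from an explicit stack, pushing each state's matching children in reverse index order so the LIFO pop reproduces the recursion's exact yield order.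
import Mathlib
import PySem

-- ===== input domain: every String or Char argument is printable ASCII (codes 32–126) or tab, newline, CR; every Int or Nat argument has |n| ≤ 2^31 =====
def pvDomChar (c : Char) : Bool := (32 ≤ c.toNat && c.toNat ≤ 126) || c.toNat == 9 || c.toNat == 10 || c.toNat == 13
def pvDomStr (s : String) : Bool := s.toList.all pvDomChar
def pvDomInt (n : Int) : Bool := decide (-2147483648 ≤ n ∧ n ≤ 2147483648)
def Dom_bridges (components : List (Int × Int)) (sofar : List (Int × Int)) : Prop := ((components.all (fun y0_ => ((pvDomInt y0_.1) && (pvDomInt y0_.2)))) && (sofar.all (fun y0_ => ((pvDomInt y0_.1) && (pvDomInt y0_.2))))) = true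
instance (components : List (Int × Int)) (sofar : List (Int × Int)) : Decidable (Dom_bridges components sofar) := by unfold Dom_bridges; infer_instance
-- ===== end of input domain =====

-- B rewrites A's recursive generator as an iterative pre-order DFS over an explicit stack
-- (objective: alternative decomposition, same cost); equivalence is about the yielded sequence.

-- ===== PORT A =====
-- 'for i, comp in enumerate(components)' is ported as a structural scan carrying the
-- already-seen prefix: 'pre' is components[:i], 'rest' is components[i:], so the slice
-- components[:i] + components[i+1:] is exactly pre ++ rs.
mutual
def bridges (components : List (Int × Int)) (sofar : List (Int × Int)) : List (List (Int × Int)) :=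
  bridgesLoop [] components sofar (match sofar.getLast? with | some c => c.2 | none => 0)
  termination_by (components.length, 1, 0)
  decreasing_by simp [Prod.lex_def]

def bridgesLoop (pre rest : List (Int × Int)) (sofar : List (Int × Int)) (last_port : Int) : List (List (Int × Int)) :=
  match rest with
  | [] => []
  | comp :: rs =>
    let use_comp : Option (Int × Int) :=
      if comp.1 = last_port then some comp
      else if comp.2 = last_port then some (comp.2, comp.1)
      else none
    match use_comp with
    | none => bridgesLoop (pre ++ [comp]) rs sofar last_port
    | some u =>
      let bridge := sofar ++ [u]
      bridge :: (bridges (pre ++ rs) bridge ++ bridgesLoop (pre ++ [comp]) rs sofar last_port)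
  termination_by (pre.length + rest.length, 0, rest.length)
  decreasing_by all_goals (simp [Prod.lex_def, List.length_append]; try omega)
end

-- ===== PORT B =====
-- child states scanned in original index order ('children' of Source B); each entry is
-- (remaining components, extended bridge, emit-flag).
def bChildren (pre rest bridge : List (Int × Int)) (last : Int) : List ((List (Int × Int)) × (List (Int × Int)) × Bool) :=
  match rest with
  | [] => []
  | comp :: rs =>
    if comp.1 = last then (pre ++ rs, bridge ++ [comp], true) :: bChildren (pre ++ [comp]) rs bridge last
    else if comp.2 = last then (pre ++ rs, bridge ++ [(comp.2, comp.1)], true) :: bChildren (pre ++ [comp]) rs bridge last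
    else bChildren (pre ++ [comp]) rs bridge last

-- termination measure for the while-loop: factorial weight of the stack
def stackWeight (stack : List ((List (Int × Int)) × (List (Int × Int)) × Bool)) : Nat :=
  (stack.map (fun e => (e.1.length + 1).factorial)).sum

theorem stackWeight_cons (e) (l) : stackWeight (e :: l) = (e.1.length + 1).factorial + stackWeight l := rfl
theorem stackWeight_append (l₁ l₂) : stackWeight (l₁ ++ l₂) = stackWeight l₁ + stackWeight l₂ := by
  induction l₁ with
  | nil => simp [stackWeight]
  | cons e l ih => simp [stackWeight_cons, ih]; omega

theorem bChildren_weight : ∀ (rest pre bridge : List (Int × Int)) (last : Int),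
    stackWeight (bChildren pre rest bridge last) ≤ rest.length * (pre.length + rest.length).factorial := by
  intro rest
  induction rest with
  | nil => intro pre bridge last; simp [bChildren, stackWeight]
  | cons comp rs ih =>
    intro pre bridge last
    have hfac : ((pre ++ [comp]).length + rs.length).factorial = (pre.length + (comp :: rs).length).factorial := by
      simp [List.length_append]; ring_nf
    have h := ih (pre ++ [comp]) bridge last
    rw [hfac] at h
    simp only [bChildren]
    split_ifs with h1 h2
    · rw [stackWeight_cons]
      simp only [List.length_append, List.length_cons]
      have : (pre.length + rs.length + 1).factorial = (pre.length + (rs.length + 1)).factorial := by ring_nf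
      rw [this]
      calc (pre.length + (rs.length + 1)).factorial + stackWeight (bChildren (pre ++ [comp]) rs bridge last)
          ≤ (pre.length + (rs.length + 1)).factorial + rs.length * (pre.length + (rs.length + 1)).factorial := by
            have := h; simp only [List.length_cons] at this; omega
        _ = (rs.length + 1) * (pre.length + (rs.length + 1)).factorial := by ring
    · rw [stackWeight_cons]
      simp only [List.length_append, List.length_cons]
      have : (pre.length + rs.length + 1).factorial = (pre.length + (rs.length + 1)).factorial := by ring_nf
      rw [this]
      calc (pre.length + (rs.length + 1)).factorial + stackWeight (bChildren (pre ++ [comp]) rs bridge last)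
          ≤ (pre.length + (rs.length + 1)).factorial + rs.length * (pre.length + (rs.length + 1)).factorial := by
            have := h; simp only [List.length_cons] at this; omega
        _ = (rs.length + 1) * (pre.length + (rs.length + 1)).factorial := by ring
    · have := h; simp only [List.length_cons] at this ⊢
      have hmono : rs.length * (pre.length + (rs.length + 1)).factorial
          ≤ (rs.length + 1) * (pre.length + (rs.length + 1)).factorial := by
        exact Nat.mul_le_mul_right _ (by omega)
      omega

-- the while-loop of Source B: pop the top state, yield its bridge if it is not the seed,
-- push its children (reverse-pushed in Source B, hence popped in original order = placed at
-- the head here, exact).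
def bridgesAltLoop (stack : List ((List (Int × Int)) × (List (Int × Int)) × Bool)) : List (List (Int × Int)) :=
  match stack with
  | [] => []
  | (comps, bridge, emit) :: rest =>
    let last : Int := match bridge.getLast? with | some c => c.2 | none => 0
    let out := bridgesAltLoop (bChildren [] comps bridge last ++ rest)
    if emit then bridge :: out else out
  termination_by stackWeight stack
  decreasing_by
    rw [stackWeight_append, stackWeight_cons]
    have h := bChildren_weight comps [] bridge (match bridge.getLast? with | some c => c.2 | none => 0)
    simp only [List.length_nil, Nat.zero_add] at h
    have hlt : comps.length * comps.length.factorial < (comps.length + 1).factorial := by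
      rw [Nat.factorial_succ]
      have : 0 < comps.length.factorial := Nat.factorial_pos _
      nlinarith
    show stackWeight _ + stackWeight rest < (comps.length + 1).factorial + stackWeight rest
    omega

def bridges_alt (components : List (Int × Int)) (sofar : List (Int × Int)) : List (List (Int × Int)) :=
  bridgesAltLoop [(components, sofar, false)]

-- ===== PRECONDITION & SPEC =====
def Spec_bridges (components : List (Int × Int)) (sofar : List (Int × Int)) (out : List (List (Int × Int))) : Prop := out = bridges_alt components sofar
instance (components : List (Int × Int)) (sofar : List (Int × Int)) (out : List (List (Int × Int))) : Decidable (Spec_bridges components sofar out) := by unfold Spec_bridges; infer_instance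

-- ===== CLAIM (what is proved, stated in full; the proofs are below) =====
def Claim_equal_bridges : Prop := ∀ (components : List (Int × Int)) (sofar : List (Int × Int)), Dom_bridges components sofar → Spec_bridges components sofar (bridges components sofar)

-- ===== LEMMAS AND PROOFS =====

-- what one stack entry contributes to the output
def entryOut (e : (List (Int × Int)) × (List (Int × Int)) × Bool) : List (List (Int × Int)) :=
  (if e.2.2 then [e.2.1] else []) ++ bridges e.1 e.2.1

theorem children_flat : ∀ (rest pre bridge : List (Int × Int)) (last : Int),
    (bChildren pre rest bridge last).flatMap entryOut = bridgesLoop pre rest bridge last := by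
  intro rest
  induction rest with
  | nil => intro pre bridge last; rw [bridgesLoop]; simp [bChildren]
  | cons comp rs ih =>
    intro pre bridge last
    rw [bridgesLoop]
    simp only [bChildren]
    split_ifs with h1 h2
    · simp [entryOut, ih]
    · simp [h2, entryOut, ih]
    · simp [ih]

theorem loop_flat : ∀ stack, bridgesAltLoop stack = stack.flatMap entryOut := by
  intro stack
  induction stack using bridgesAltLoop.induct with
  | case1 => simp [bridgesAltLoop]
  | case2 comps bridge rest lastv ih =>
    rw [bridgesAltLoop]
    rw [ih, List.flatMap_append, children_flat, List.flatMap_cons]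
    have hb : bridges comps bridge
        = bridgesLoop [] comps bridge (match bridge.getLast? with | some c => c.2 | none => 0) := by
      rw [bridges]
    simp [entryOut, hb]
    rfl
  | case3 comps bridge emit rest lastv hne ih =>
    rw [bridgesAltLoop]
    rw [ih, List.flatMap_append, children_flat, List.flatMap_cons]
    have hb : bridges comps bridge
        = bridgesLoop [] comps bridge (match bridge.getLast? with | some c => c.2 | none => 0) := by
      rw [bridges]
    simp only [Bool.not_eq_true] at hne
    subst hne
    simp [entryOut, hb]
    rfl

-- ===== VERDICT (by name: the statement is the Claim_ definition above) =====
theorem bridges_spec : Claim_equal_bridges := by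
  intro components sofar _
  unfold Spec_bridges bridges_alt
  rw [loop_flat]
  simp [entryOut, List.flatMap_cons]
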